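-- pv_equiv track=rewrite | github.com/rrwick/Verticall | scripts/draw_alignment_masking.py | get_missing_regions
-- ===== SOURCE A (Python) =====
-- def get_missing_regions(unmasked_seq, ignore_size):
--     missing_regions = []
--     start = None
--     for i, unmasked_base in enumerate(unmasked_seq):
--         if not is_canonical(unmasked_base):
--             if start is None:
--                 start = i
--         else:
--             if start is not None:
--                 if i - start > ignore_size:
--                     missing_regions.append((start, i))
--                 start = None
--     if start is not None:
--         i += 1
--         if i - start > ignore_size:
--             missing_regions.append((start, i))
--     return missing_regions
--
-- def is_canonical(b):
--     return b == 'A' or b == 'C' or b == 'G' or b == 'T'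
-- ===== SOURCE B (Python) =====
-- def get_missing_regions(unmasked_seq, ignore_size):
--     # Boundary-detection formulation: mark non-canonical positions, find run
--     # starts/ends by comparing each position with its neighbour via shifted
--     # zips, pair them up, and keep the runs longer than ignore_size.
--     bad = [not is_canonical(b) for b in unmasked_seq]
--     edges = list(zip([False] + bad, bad + [False]))
--     starts = [i for i, (prev, cur) in enumerate(edges) if cur and not prev]
--     ends = [i for i, (prev, cur) in enumerate(edges) if prev and not cur]
--     return [(s, e) for s, e in zip(starts, ends) if e - s > ignore_size]
--
-- def is_canonical(b):
--     return b == 'A' or b == 'C' or b == 'G' or b == 'T'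
-- ===== Notes on version B (the rewrite author's own statement) =====
-- stated objective: alternative
-- what changed: Replaces A's single-pass start/None state machine (with its post-loop flush via the leftover loop index) by staged passes: build a boolean non-canonical mask, detect run starts and run ends by zipping the mask with shifted copies of itself, pair starts with ends, and filter by length.
import Mathlib
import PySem

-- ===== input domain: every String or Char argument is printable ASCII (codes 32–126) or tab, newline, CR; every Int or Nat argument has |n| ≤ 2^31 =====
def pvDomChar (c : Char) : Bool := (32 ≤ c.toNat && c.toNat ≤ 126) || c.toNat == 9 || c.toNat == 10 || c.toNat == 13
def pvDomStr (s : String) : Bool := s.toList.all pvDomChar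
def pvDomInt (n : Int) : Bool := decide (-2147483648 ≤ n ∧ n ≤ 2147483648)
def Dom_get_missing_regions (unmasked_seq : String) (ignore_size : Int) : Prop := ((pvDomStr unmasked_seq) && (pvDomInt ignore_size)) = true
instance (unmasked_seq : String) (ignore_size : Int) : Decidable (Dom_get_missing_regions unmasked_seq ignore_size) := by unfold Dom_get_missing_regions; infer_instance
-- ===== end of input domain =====

-- B replaces A's start/None state machine by staged passes: a boolean mask of
-- non-canonical positions, boundary detection via shifted zips, pairing of
-- starts with ends, then a length filter; an alternative O(n) decomposition.

-- ===== PORT A =====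
def is_canonical (b : Char) : Bool := b == 'A' || b == 'C' || b == 'G' || b == 'T'

-- A's for-loop: state (missing_regions, start, i); at the end i is one past the
-- last index, matching Python's 'i += 1' in the tail case.
def aLoop (ig : Int) (missing : List (Int × Int)) (start : Option Int) (i : Int) :
    List Char → List (Int × Int) × Option Int × Int
  | [] => (missing, start, i)
  | c :: rest =>
    if !(is_canonical c) then
      match start with
      | none => aLoop ig missing (some i) (i + 1) rest
      | some _ => aLoop ig missing start (i + 1) rest
    else
      match start with
      | some s0 => aLoop ig (if i - s0 > ig then missing ++ [(s0, i)] else missing) none (i + 1) rest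
      | none => aLoop ig missing none (i + 1) rest

-- A's tail after the loop (the 'if start is not None' flush).
def aFinish (ig : Int) (r : List (Int × Int) × Option Int × Int) : List (Int × Int) :=
  match r.2.1 with
  | some s0 => if r.2.2 - s0 > ig then r.1 ++ [(s0, r.2.2)] else r.1
  | none => r.1

def get_missing_regions (unmasked_seq : String) (ignore_size : Int) : List (Int × Int) :=
  aFinish ignore_size (aLoop ignore_size [] none 0 unmasked_seq.toList)

-- ===== PORT B =====
def get_missing_regions_alt (unmasked_seq : String) (ignore_size : Int) : List (Int × Int) :=
  let bad := unmasked_seq.toList.map (fun b => !is_canonical b)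
  let edges := (false :: bad).zip (bad ++ [false])
  let starts := ((PySem.List.enumerate edges 0).filter (fun x => x.2.2 && !x.2.1)).map (·.1)
  let ends := ((PySem.List.enumerate edges 0).filter (fun x => x.2.1 && !x.2.2)).map (·.1)
  (starts.zip ends).filter (fun p => p.2 - p.1 > ignore_size)

-- ===== PRECONDITION & SPEC =====
def Spec_get_missing_regions (unmasked_seq : String) (ignore_size : Int) (out : List (Int × Int)) : Prop := out = get_missing_regions_alt unmasked_seq ignore_size
instance (unmasked_seq : String) (ignore_size : Int) (out : List (Int × Int)) : Decidable (Spec_get_missing_regions unmasked_seq ignore_size out) := by unfold Spec_get_missing_regions; infer_instance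

-- ===== CLAIM (what is proved, stated in full; the proofs are below) =====
def Claim_equal_get_missing_regions : Prop := ∀ (unmasked_seq : String) (ignore_size : Int), Dom_get_missing_regions unmasked_seq ignore_size → Spec_get_missing_regions unmasked_seq ignore_size (get_missing_regions unmasked_seq ignore_size)

-- ===== LEMMAS AND PROOFS =====

-- Proof-only helpers: run-start and run-end positions of a boolean mask,
-- carried with the previous element's value and the current index.
def runStarts (prev : Bool) (i : Int) : List Bool → List Int
  | [] => []
  | b :: r => (if b && !prev then [i] else []) ++ runStarts b (i + 1) r

def runEnds (prev : Bool) (i : Int) : List Bool → List Int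
  | [] => if prev then [i] else []
  | b :: r => (if prev && !b then [i] else []) ++ runEnds b (i + 1) r

-- B's enumerate-over-shifted-zip pass computes runStarts / runEnds.
theorem starts_eq (bad : List Bool) : ∀ prev i,
    (((PySem.List.enumerate ((prev :: bad).zip (bad ++ [false])) i).filter
        (fun x => x.2.2 && !x.2.1)).map (·.1)) = runStarts prev i bad := by
  induction bad with
  | nil =>
    intro prev i
    simp [PySem.List.enumerate_cons, PySem.List.enumerate_nil, runStarts]
  | cons b r ih =>
    intro prev i
    simp only [List.cons_append, List.zip_cons_cons, PySem.List.enumerate_cons,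
      List.filter_cons, runStarts]
    by_cases h : (b && !prev) = true
    · simp [h, ih]
    · simp [h, ih]

theorem ends_eq (bad : List Bool) : ∀ prev i,
    (((PySem.List.enumerate ((prev :: bad).zip (bad ++ [false])) i).filter
        (fun x => x.2.1 && !x.2.2)).map (·.1)) = runEnds prev i bad := by
  induction bad with
  | nil =>
    intro prev i
    by_cases h : prev = true <;>
      simp [PySem.List.enumerate_cons, PySem.List.enumerate_nil, runEnds, h]
  | cons b r ih =>
    intro prev i
    simp only [List.cons_append, List.zip_cons_cons, PySem.List.enumerate_cons,
      List.filter_cons, runEnds]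
    by_cases h : (prev && !b) = true
    · simp [h, ih]
    · simp [h, ih]

-- A's state machine produces the filtered zip of runStarts/runEnds; two loop
-- invariants proved simultaneously (outside a run / inside a run with pending s0).
theorem aLoop_eq (ig : Int) : ∀ l : List Char,
    (∀ i missing, aFinish ig (aLoop ig missing none i l) =
      missing ++ ((runStarts false i (l.map (fun c => !is_canonical c))).zip
          (runEnds false i (l.map (fun c => !is_canonical c)))).filter
        (fun p => p.2 - p.1 > ig))
    ∧ (∀ i s0 missing, aFinish ig (aLoop ig missing (some s0) i l) =
      missing ++ ((s0 :: runStarts true i (l.map (fun c => !is_canonical c))).zip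
          (runEnds true i (l.map (fun c => !is_canonical c)))).filter
        (fun p => p.2 - p.1 > ig)) := by
  intro l
  induction l with
  | nil =>
    constructor
    · intro i missing; simp [aLoop, aFinish, runStarts, runEnds]
    · intro i s0 missing
      simp only [aLoop, aFinish, List.map_nil, runStarts, runEnds]
      by_cases h : i - s0 > ig
      · simp [h]
      · simp [h]
  | cons c rest ih =>
    constructor
    · intro i missing
      by_cases hc : is_canonical c = true
      · rw [show aLoop ig missing none i (c :: rest) = aLoop ig missing none (i + 1) rest by
          simp [aLoop, hc]]
        rw [ih.1 (i + 1) missing]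
        simp [runStarts, runEnds, hc]
      · rw [show aLoop ig missing none i (c :: rest) = aLoop ig missing (some i) (i + 1) rest by
          simp [aLoop, hc]]
        rw [ih.2 (i + 1) i missing]
        simp [runStarts, runEnds, hc]
    · intro i s0 missing
      by_cases hc : is_canonical c = true
      · rw [show aLoop ig missing (some s0) i (c :: rest)
            = aLoop ig (if i - s0 > ig then missing ++ [(s0, i)] else missing) none (i + 1) rest by
          simp [aLoop, hc]]
        rw [ih.1 (i + 1) _]
        by_cases h : i - s0 > ig <;>
          simp [runStarts, runEnds, hc, h]
      · rw [show aLoop ig missing (some s0) i (c :: rest)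
            = aLoop ig missing (some s0) (i + 1) rest by simp [aLoop, hc]]
        rw [ih.2 (i + 1) s0 missing]
        simp [runStarts, runEnds, hc]

-- ===== VERDICT (by name: the statement is the Claim_ definition above) =====
theorem get_missing_regions_spec : Claim_equal_get_missing_regions := by
  intro s ig _
  unfold Spec_get_missing_regions get_missing_regions get_missing_regions_alt
  dsimp only
  rw [(aLoop_eq ig s.toList).1 0 [], starts_eq, ends_eq]
  simp
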